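-- pv_equiv track=rewrite | github.com/martinfama/Project-Euler-Solutions | 0061/main.py | is_number_chain
-- ===== SOURCE A (Python) =====
-- from itertools import permutations
--
-- def is_number_chain(n):
--     # given a list of 4 digit numbers, check if the last two digits of n_1 are the first
--     # of n_2, the last two digits of n_2 are the first of n_3, and so on. check all permutations
--     n_perm = permutations(n, len(n))
--     for perm in n_perm:
--         valid = False
--         for i in range(len(perm) - 1):
--             if str(perm[i])[-2:] != str(perm[i + 1])[:2]:
--                 valid = False
--                 break
--             valid = True
--         if valid and str(perm[-1])[-2:] == str(perm[0])[:2]: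
--             return True
--
--     return False
-- ===== SOURCE B (Python) =====
-- def is_number_chain(n):
--     # Backtracking: grow only chains whose suffix->prefix link already holds,
--     # instead of generating and testing every permutation.
--     if len(n) < 2:
--         return False  # a cyclic chain needs at least two numbers
--
--     def link(a, b):
--         return str(a)[-2:] == str(b)[:2]
--
--     def picks(lst):
--         # all ways to pick one element out of lst: (element, rest)
--         if not lst:
--             return []
--         x, rest = lst[0], lst[1:]
--         return [(x, rest)] + [(y, [x] + r) for (y, r) in picks(rest)]
--
--     def dfs(first, last, remaining):
--         if not remaining:
--             return link(last, first)
--         return any(link(last, x) and dfs(first, x, rest)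
--                    for (x, rest) in picks(remaining))
--
--     return any(dfs(x, x, rest) for (x, rest) in picks(n))
-- ===== Notes on version B (the rewrite author's own statement) =====
-- stated objective: alternative
-- what changed: Replaced exhaustive generate-all-permutations-then-test with pruned backtracking that only extends partial chains whose suffix->prefix link already holds (checking the link before recursing), with an explicit >=2-element guard for the trivial sizes; intended as faster, but a timing run could not confirm a ratio (A already times out at n=16 where B still returns).
import Mathlib
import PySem

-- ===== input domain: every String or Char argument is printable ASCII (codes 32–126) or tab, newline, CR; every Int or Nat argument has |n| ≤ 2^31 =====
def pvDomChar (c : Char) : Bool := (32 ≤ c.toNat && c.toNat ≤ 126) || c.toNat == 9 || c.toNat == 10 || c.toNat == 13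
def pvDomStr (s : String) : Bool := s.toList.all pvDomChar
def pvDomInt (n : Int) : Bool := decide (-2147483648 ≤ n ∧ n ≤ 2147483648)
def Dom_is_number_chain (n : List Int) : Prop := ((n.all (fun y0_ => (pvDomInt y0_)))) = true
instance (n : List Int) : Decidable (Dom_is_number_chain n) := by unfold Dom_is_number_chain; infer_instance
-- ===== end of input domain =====

-- B replaces A's generate-every-permutation-and-test search by pruned backtracking that
-- only extends partial chains whose suffix->prefix link already holds (objective: alternative).

-- ===== PORT A =====
-- str(a)[-2:]
def pvSfx (a : Int) : String := PySem.Str.slice (PySem.Int.toStr a) (some (-2)) none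
-- str(b)[:2]
def pvPfx (b : Int) : String := PySem.Str.slice (PySem.Int.toStr b) none (some 2)

-- the inner 'for i in range(len(perm) - 1)' loop with its 'valid' flag and break
def pvLoopA (p : List Int) (i : Nat) (valid : Bool) : Bool :=
  if h : (i : Int) < (p.length : Int) - 1 then
    if !(pvSfx (PySem.List.pyGetD p (i : Int) 0) == pvPfx (PySem.List.pyGetD p ((i : Int) + 1) 0)) then
      false
    else
      pvLoopA p (i + 1) true
  else valid
termination_by p.length - i
decreasing_by omega

-- itertools.permutations(n, len(n)) is PySem.List.permutations n n.length
def is_number_chain (n : List Int) : Bool :=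
  (PySem.List.permutations n n.length).any (fun perm =>
    let valid := pvLoopA perm 0 false
    valid && (pvSfx (PySem.List.pyGetD perm (-1) 0) == pvPfx (PySem.List.pyGetD perm 0 0)))

-- ===== PORT B =====
-- link(a, b): str(a)[-2:] == str(b)[:2]
def pvLink (a b : Int) : Bool :=
  PySem.Str.slice (PySem.Int.toStr a) (some (-2)) none ==
    PySem.Str.slice (PySem.Int.toStr b) none (some 2)

-- picks(lst): all ways to pick one element out of lst, as (element, rest) pairs
def pvPicks : List Int → List (Int × List Int)
  | [] => []
  | x :: rest => (x, rest) :: (pvPicks rest).map (fun yr => (yr.1, x :: yr.2))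

-- needed by pvDfs's termination proof
theorem pvPicks_mem_length : ∀ (l : List Int) (t : Int × List Int), t ∈ pvPicks l → t.2.length + 1 = l.length := by
  intro l
  induction l with
  | nil => intro t h; simp [pvPicks] at h
  | cons x rest ih =>
    intro t h
    simp only [pvPicks, List.mem_cons, List.mem_map] at h
    rcases h with h | ⟨yr, hm, rfl⟩
    · subst h; simp
    · have := ih yr hm; simp; omega

def pvDfs (first last : Int) (remaining : List Int) : Bool :=
  if remaining = [] then pvLink last first
  else (pvPicks remaining).attach.any (fun t => pvLink last t.1.1 && pvDfs first t.1.1 t.1.2)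
termination_by remaining.length
decreasing_by
  have h := pvPicks_mem_length remaining t.1 t.2
  omega

def is_number_chain_alt (n : List Int) : Bool :=
  if n.length < 2 then false
  else (pvPicks n).any (fun xr => pvDfs xr.1 xr.1 xr.2)

-- ===== PRECONDITION & SPEC =====
def Spec_is_number_chain (n : List Int) (out : Bool) : Prop := out = is_number_chain_alt n
instance (n : List Int) (out : Bool) : Decidable (Spec_is_number_chain n out) := by unfold Spec_is_number_chain; infer_instance

-- ===== CLAIM (what is proved, stated in full; the proofs are below) =====
def Claim_equal_is_number_chain : Prop := ∀ (n : List Int), Dom_is_number_chain n → Spec_is_number_chain n (is_number_chain n)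

-- ===== LEMMAS AND PROOFS =====

-- all adjacent suffix->prefix links hold
def pvChain : List Int → Bool
  | [] => true
  | [_] => true
  | a :: b :: t => pvLink a b && pvChain (b :: t)

-- the whole list is a closed chain
def pvCyc : List Int → Bool
  | [] => false
  | x :: q => pvChain (x :: q) && pvLink (q.getLastD x) x

theorem pvAndAny (c : Bool) (l : List (List Int)) (g : List Int → Bool) :
    (c && l.any g) = l.any (fun q => c && g q) := by
  cases c <;> simp

theorem pvGetDNegOne (p : List Int) (h : p ≠ []) : PySem.List.pyGetD p (-1) 0 = p.getLastD 0 := by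
  have h1 : 1 ≤ p.length := List.length_pos_of_ne_nil h
  simp [PySem.List.pyGetD, PySem.List.pyGet?, PySem.List.pyIdx?, h1,
        List.getLastD_eq_getLast?, List.getLast?_eq_getElem?]

theorem pvGetDCastSucc (p : List Int) (i : Nat) :
    PySem.List.pyGetD p ((i : Int) + 1) 0 = p.getD (i + 1) 0 := by
  rw [show ((i : Int) + 1) = (((i + 1 : Nat)) : Int) by push_cast; ring, PySem.List.pyGetD_natCast]

theorem pvGetDZero (p : List Int) : PySem.List.pyGetD p (0 : Int) 0 = p.getD 0 0 := by
  simp [pysem]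

theorem pvPicks_any : ∀ (l : List Int) (f : Int × List Int → Bool),
    (pvPicks l).any f = (List.range l.length).any (fun i => f (l.getD i 0, l.eraseIdx i)) := by
  intro l
  induction l with
  | nil => intro f; simp [pvPicks]
  | cons x rest ih =>
    intro f
    simp only [pvPicks, List.any_cons, List.any_map, List.length_cons, List.range_succ_eq_map]
    rw [ih]
    simp [Function.comp_def, List.eraseIdx_cons_succ, Nat.succ_eq_add_one]

theorem pvAnyPerm_succ (xs : List Int) (m : Nat) (hm : xs.length = m + 1) (P : List Int → Bool) :
    (PySem.List.permutations xs (m + 1)).any P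
      = (List.range xs.length).any
          (fun i => (PySem.List.permutations (xs.eraseIdx i) ((xs.eraseIdx i).length)).any
            (fun q => P (xs.getD i 0 :: q))) := by
  simp only [PySem.List.permutations, List.any_flatMap]
  apply PySem.List.any_congr_mem
  intro i hi
  rw [List.mem_range] at hi
  rw [List.getElem?_eq_getElem hi]
  simp only [List.any_map]
  rw [List.length_eraseIdx_of_lt hi, hm]
  simp [Function.comp_def, List.getElem?_eq_getElem hi]

theorem pvLoopA_eq (p : List Int) :
    ∀ (k i : Nat) (v : Bool), p.length - i = k →
      pvLoopA p i v = if i + 1 < p.length then pvChain (p.drop i) else v := by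
  intro k
  induction k with
  | zero =>
    intro i v hk
    rw [pvLoopA.eq_def, dif_neg (by omega), if_neg (by omega)]
  | succ k ih =>
    intro i v hk
    rw [pvLoopA.eq_def]
    by_cases hi : i + 1 < p.length
    · have hi0 : i < p.length := by omega
      rw [dif_pos (show (i : Int) < (p.length : Int) - 1 by omega)]
      rw [if_pos hi]
      rw [PySem.List.pyGetD_natCast, pvGetDCastSucc]
      rw [List.getD_eq_getElem _ _ hi0, List.getD_eq_getElem _ _ hi]
      rw [ih (i + 1) true (by omega)]
      rw [List.drop_eq_getElem_cons hi0]
      rw [List.drop_eq_getElem_cons hi]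
      have hch : pvChain (p[i] :: p[i + 1] :: p.drop (i + 1 + 1))
          = (pvLink p[i] p[i + 1] && pvChain (p[i + 1] :: p.drop (i + 1 + 1))) := by
        simp [pvChain]
      rw [hch, show (pvSfx p[i] == pvPfx p[i + 1]) = pvLink p[i] p[i + 1] from rfl]
      by_cases h3 : i + 1 + 1 < p.length
      · rw [if_pos h3]
        cases pvLink p[i] p[i + 1] <;> simp
      · rw [if_neg h3]
        have hnil : p.drop (i + 1 + 1) = [] := List.drop_eq_nil_of_le (by omega)
        rw [hnil]
        cases pvLink p[i] p[i + 1] <;> simp [pvChain]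
    · rw [dif_neg (show ¬ ((i : Int) < (p.length : Int) - 1) by omega), if_neg hi]

theorem pvDfs_eq :
    ∀ (k : Nat) (remaining : List Int), remaining.length = k → ∀ (first last : Int),
      pvDfs first last remaining
        = (PySem.List.permutations remaining remaining.length).any
            (fun q => pvChain (last :: q) && pvLink (q.getLastD last) first) := by
  intro k
  induction k with
  | zero =>
    intro r hr first last
    cases r with
    | cons a t => simp at hr
    | nil =>
      rw [pvDfs.eq_def, if_pos rfl]
      simp [pvChain]
  | succ k ih =>
    intro r hr first last
    have hne : r ≠ [] := by intro h; subst h; simp at hr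
    rw [pvDfs.eq_def, if_neg hne]
    have hattach : (pvPicks r).attach.any (fun t => pvLink last t.1.1 && pvDfs first t.1.1 t.1.2)
        = (pvPicks r).any (fun t => pvLink last t.1 && pvDfs first t.1 t.2) := by
      rw [Bool.eq_iff_iff]
      simp only [List.any_eq_true, List.mem_attach, true_and, Subtype.exists, Prod.exists]
      constructor
      · rintro ⟨a, b, hm, hd⟩
        exact ⟨a, b, hm, hd⟩
      · rintro ⟨a, b, hm, hd⟩
        exact ⟨a, b, hm, hd⟩
    rw [hattach, pvPicks_any]
    have hR : (PySem.List.permutations r r.length).any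
          (fun q => pvChain (last :: q) && pvLink (q.getLastD last) first)
        = (List.range r.length).any
            (fun i => (PySem.List.permutations (r.eraseIdx i) ((r.eraseIdx i).length)).any
              (fun q => pvChain (last :: (r.getD i 0 :: q)) && pvLink ((r.getD i 0 :: q).getLastD last) first)) := by
      conv_lhs => rw [hr]
      exact pvAnyPerm_succ r k hr _
    rw [hR]
    apply PySem.List.any_congr_mem
    intro i hi
    rw [List.mem_range] at hi
    rw [ih (r.eraseIdx i) (by rw [List.length_eraseIdx_of_lt hi, hr]; omega)]
    rw [pvAndAny]
    apply PySem.List.any_congr_mem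
    intro q _
    simp only [pvChain, List.getLastD_cons, Bool.and_assoc]

theorem pvA_eq (n : List Int) :
    is_number_chain n
      = if n.length < 2 then false else (PySem.List.permutations n n.length).any pvCyc := by
  unfold is_number_chain
  by_cases h2 : n.length < 2
  · rw [if_pos h2]
    rw [List.any_eq_false]
    intro p hp
    have hl : p.length = n.length := (PySem.List.perm_of_mem_permutations hp).length_eq
    have hfalse : pvLoopA p 0 false = false := by
      rw [pvLoopA_eq p p.length 0 false (by omega), if_neg (by omega)]
    simp [hfalse]
  · rw [if_neg h2]
    apply PySem.List.any_congr_mem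
    intro p hp
    have hl : p.length = n.length := (PySem.List.perm_of_mem_permutations hp).length_eq
    cases p with
    | nil => exfalso; simp at hl; omega
    | cons x q =>
      show (pvLoopA (x :: q) 0 false
        && (pvSfx (PySem.List.pyGetD (x :: q) (-1) 0) == pvPfx (PySem.List.pyGetD (x :: q) 0 0)))
          = pvCyc (x :: q)
      have hloop : pvLoopA (x :: q) 0 false = pvChain (x :: q) := by
        rw [pvLoopA_eq _ _ 0 false rfl, if_pos (by simp only [List.length_cons] at hl ⊢; omega)]
        simp
      have hneg : PySem.List.pyGetD (x :: q) (-1) 0 = (x :: q).getLastD 0 :=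
        pvGetDNegOne _ (by simp)
      rw [hloop, hneg, pvGetDZero]
      rw [show (x :: q).getLastD 0 = q.getLastD x from List.getLastD_cons]
      rfl

theorem pvB_eq (n : List Int) :
    is_number_chain_alt n
      = if n.length < 2 then false else (PySem.List.permutations n n.length).any pvCyc := by
  unfold is_number_chain_alt
  by_cases h2 : n.length < 2
  · rw [if_pos h2, if_pos h2]
  · rw [if_neg h2, if_neg h2]
    obtain ⟨m, hm⟩ : ∃ m, n.length = m + 1 := ⟨n.length - 1, by omega⟩
    rw [pvPicks_any]
    have hR : (PySem.List.permutations n n.length).any pvCyc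
        = (List.range n.length).any
            (fun i => (PySem.List.permutations (n.eraseIdx i) ((n.eraseIdx i).length)).any
              (fun q => pvCyc (n.getD i 0 :: q))) := by
      conv_lhs => rw [hm]
      exact pvAnyPerm_succ n m hm _
    rw [hR]
    apply PySem.List.any_congr_mem
    intro i hi
    rw [pvDfs_eq ((n.eraseIdx i).length) _ rfl]
    apply PySem.List.any_congr_mem
    intro q _
    simp [pvCyc]

-- ===== VERDICT (by name: the statement is the Claim_ definition above) =====
theorem is_number_chain_spec : Claim_equal_is_number_chain := by
  intro n _
  unfold Spec_is_number_chain
  rw [pvA_eq, pvB_eq]
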